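-- pv_equiv track=rewrite | github.com/pietra/neural-networks | NeuralNetwork.py | generate_vector_of_classes
-- ===== SOURCE A (Python) =====
-- def generate_vector_of_classes(instance):
--
--     # GAMBI to know if classes have been splitted
--     splitted = False
--
--     for attr in instance:
--         if 'class_' in attr:
--             splitted = True
--
--     if splitted:
--         substr = 'class_'
--     else:
--         substr = 'class'
--
--     return [instance[attribute]
--             for attribute in instance if substr in attribute]
-- ===== SOURCE B (Python) =====
-- def generate_vector_of_classes(instance):
--     # One pass: collect values into two buckets as we go, then pick the bucket.
--     with_underscore = []
--     with_class = []
--     for attr, val in instance.items():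
--         if 'class_' in attr:
--             with_underscore.append(val)
--         if 'class' in attr:
--             with_class.append(val)
--     return with_underscore if with_underscore else with_class
-- ===== Notes on version B (the rewrite author's own statement) =====
-- stated objective: alternative
-- what changed: Replaces A's detect-then-filter two-pass structure (a flag loop, then a comprehension with a dict lookup per kept key) with a single traversal that appends each value into a 'class_' bucket and a 'class' bucket, returning the underscore bucket when non-empty.
import Mathlib
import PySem

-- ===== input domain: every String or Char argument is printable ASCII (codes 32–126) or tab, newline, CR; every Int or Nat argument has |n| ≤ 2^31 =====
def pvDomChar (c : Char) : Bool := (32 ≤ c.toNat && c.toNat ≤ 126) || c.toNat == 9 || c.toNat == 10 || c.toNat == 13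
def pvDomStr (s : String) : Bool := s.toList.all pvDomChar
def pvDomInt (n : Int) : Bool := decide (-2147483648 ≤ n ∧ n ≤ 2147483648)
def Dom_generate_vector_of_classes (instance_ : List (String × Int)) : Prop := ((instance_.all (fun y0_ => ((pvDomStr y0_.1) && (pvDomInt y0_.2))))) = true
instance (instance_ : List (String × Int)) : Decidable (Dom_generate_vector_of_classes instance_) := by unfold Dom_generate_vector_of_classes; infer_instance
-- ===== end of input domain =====

-- B replaces A's detect-then-filter two passes by one traversal filling two buckets; same cost, different decomposition.
-- Both ports model the dict parameter via PySem.Dict.ofList (insertion order, duplicate keys collapsed as Python's dict does).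

-- ===== PORT A =====
def generate_vector_of_classes (instance_ : List (String × Int)) : List Int :=
  let d := PySem.Dict.ofList instance_
  -- for attr in instance: if 'class_' in attr: splitted = True
  let splitted := d.keys.foldl (fun b attr => if PySem.Str.isIn "class_" attr then true else b) false
  let substr := if splitted then "class_" else "class"
  -- [instance[attribute] for attribute in instance if substr in attribute]
  d.keys.foldl (fun acc attr => if PySem.Str.isIn substr attr then acc ++ [d.getD attr 0] else acc) []

-- ===== PORT B =====
def generate_vector_of_classes_alt (instance_ : List (String × Int)) : List Int :=
  let d := PySem.Dict.ofList instance_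
  let buckets := d.items.foldl
    (fun (acc : List Int × List Int) p =>
      (if PySem.Str.isIn "class_" p.1 then acc.1 ++ [p.2] else acc.1,
       if PySem.Str.isIn "class" p.1 then acc.2 ++ [p.2] else acc.2))
    ([], [])
  if buckets.1.isEmpty then buckets.2 else buckets.1

-- ===== PRECONDITION & SPEC =====
def Spec_generate_vector_of_classes (instance_ : List (String × Int)) (out : List Int) : Prop := out = generate_vector_of_classes_alt instance_
instance (instance_ : List (String × Int)) (out : List Int) : Decidable (Spec_generate_vector_of_classes instance_ out) := by unfold Spec_generate_vector_of_classes; infer_instance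

-- ===== CLAIM (what is proved, stated in full; the proofs are below) =====
def Claim_equal_generate_vector_of_classes : Prop := ∀ (instance_ : List (String × Int)), Dom_generate_vector_of_classes instance_ → Spec_generate_vector_of_classes instance_ (generate_vector_of_classes instance_)

-- ===== LEMMAS AND PROOFS =====

-- A's flag loop computes List.any of the keys.
theorem pv_flag_fold (l : List String) (b : Bool) :
    l.foldl (fun b attr => if PySem.Str.isIn "class_" attr then true else b) b
      = (b || l.any (fun attr => PySem.Str.isIn "class_" attr)) := by
  induction l generalizing b with
  | nil => simp
  | cons x t ih =>
      simp only [List.foldl_cons, List.any_cons, ih]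
      cases h : PySem.Str.isIn "class_" x <;> cases b <;> simp [h]

-- B's pair-accumulator loop computes the two filtered value lists.
theorem pv_bucket_fold (l : List (String × Int)) (a : List Int × List Int) :
    l.foldl
      (fun (acc : List Int × List Int) p =>
        (if PySem.Str.isIn "class_" p.1 then acc.1 ++ [p.2] else acc.1,
         if PySem.Str.isIn "class" p.1 then acc.2 ++ [p.2] else acc.2)) a
      = (a.1 ++ ((l.filter (fun p => PySem.Str.isIn "class_" p.1)).map (·.2)),
         a.2 ++ ((l.filter (fun p => PySem.Str.isIn "class" p.1)).map (·.2))) := by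
  induction l generalizing a with
  | nil => simp
  | cons x t ih =>
      simp only [List.foldl_cons, List.filter_cons]
      rw [ih]
      cases h1 : PySem.Str.isIn "class_" x.1 <;>
        cases h2 : PySem.Str.isIn "class" x.1 <;>
          simp only [h1, h2, if_true, if_false, Bool.false_eq_true, List.map_cons] <;> simp

-- A's comprehension loop over keys, rewritten on items (keys ARE items.map (·.1)).
theorem pv_comp_fold (d : PySem.Dict String Int) (sub : String) (l : List (String × Int)) (a : List Int)
    (hsub : ∀ p ∈ l, d.getD p.1 0 = p.2) :
    l.foldl (fun acc p => if PySem.Str.isIn sub p.1 then acc ++ [d.getD p.1 0] else acc) a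
      = a ++ ((l.filter (fun p => PySem.Str.isIn sub p.1)).map (·.2)) := by
  induction l generalizing a with
  | nil => simp
  | cons x t ih =>
      have hx := hsub x (by simp)
      simp only [List.foldl_cons, List.filter_cons]
      rw [ih _ (fun p hp => hsub p (List.mem_cons_of_mem _ hp))]
      cases h : PySem.Str.isIn sub x.1 <;>
        simp only [h, if_true, if_false, Bool.false_eq_true, List.map_cons, hx] <;> simp

-- fold over keys = fold over items with the projection inside
theorem pv_keys_fold_items (d : PySem.Dict String Int) (sub : String) :
    d.keys.foldl (fun acc attr => if PySem.Str.isIn sub attr then acc ++ [d.getD attr 0] else acc) []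
      = d.items.foldl (fun acc p => if PySem.Str.isIn sub p.1 then acc ++ [d.getD p.1 0] else acc) [] := by
  have : d.keys = d.items.map (·.1) := rfl
  rw [this, List.foldl_map]

theorem pv_getD_items (d : PySem.Dict String Int) (hnd : d.keys.Nodup) :
    ∀ p ∈ d.items, d.getD p.1 0 = p.2 := by
  intro p hp
  have h := PySem.Dict.get?_of_mem_items (d := d) (k := p.1) (v := p.2) (by simpa using hp) hnd
  simp [PySem.Dict.getD_eq_get?_getD, h]

theorem generate_vector_of_classes_eq (instance_ : List (String × Int)) :
    generate_vector_of_classes instance_ = generate_vector_of_classes_alt instance_ := by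
  simp only [generate_vector_of_classes, generate_vector_of_classes_alt]
  set d := PySem.Dict.ofList instance_ with hd
  have hnd : d.keys.Nodup := PySem.Dict.nodup_keys_ofList instance_
  have hget := pv_getD_items d hnd
  have hkeys : d.keys = d.items.map (·.1) := rfl
  rw [pv_flag_fold, pv_bucket_fold]
  simp only [Bool.false_or, List.nil_append]
  by_cases hs : d.keys.any (fun attr => PySem.Str.isIn "class_" attr) = true
  · -- splitted: A filters on 'class_'; B's underscore bucket is non-empty
    rw [if_pos hs, pv_keys_fold_items, pv_comp_fold d "class_" d.items [] hget]
    simp only [List.nil_append]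
    have hne : ((d.items.filter (fun p => PySem.Str.isIn "class_" p.1)).map (·.2)) ≠ [] := by
      rw [hkeys, List.any_map] at hs
      simp only [List.any_eq_true, Function.comp] at hs
      obtain ⟨p, hp, hpc⟩ := hs
      intro hnil
      rw [List.map_eq_nil_iff] at hnil
      have hmem : p ∈ d.items.filter (fun p => PySem.Str.isIn "class_" p.1) :=
        List.mem_filter.mpr ⟨hp, hpc⟩
      rw [hnil] at hmem
      exact List.not_mem_nil hmem
    rw [if_neg (by simpa only [List.isEmpty_iff] using hne)]
  · -- not splitted: A filters on 'class'; B's underscore bucket is empty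
    rw [if_neg hs, pv_keys_fold_items, pv_comp_fold d "class" d.items [] hget]
    simp only [List.nil_append]
    have hemp : (d.items.filter (fun p => PySem.Str.isIn "class_" p.1)) = [] := by
      rw [List.filter_eq_nil_iff]
      intro p hp hc
      apply hs
      rw [hkeys, List.any_map]
      simp only [List.any_eq_true, Function.comp]
      exact ⟨p, hp, hc⟩
    rw [hemp]
    simp

-- ===== VERDICT (by name: the statement is the Claim_ definition above) =====
theorem generate_vector_of_classes_spec : Claim_equal_generate_vector_of_classes := by
  intro instance_ _
  unfold Spec_generate_vector_of_classes
  exact generate_vector_of_classes_eq instance_
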